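-- pv_equiv track=rewrite | github.com/Kevin-Norlin/adventofcode2024 | day7.py | gen_op_rec
-- ===== SOURCE A (Python) =====
-- OPERATORS = ['*','+']
--
-- def gen_op_rec(n: int, l: list[list[str]]):
--     length = len(l)
--     if n == 0:
--         return l
--     op = 0
--     for i in range(length):
--         l[i].append(OPERATORS[op])
--         if i % (pow(2,n) // 2) == 0:
--             op = 1 if op == 0 else 0
--
--     return gen_op_rec(n-1, l)
-- ===== SOURCE B (Python) =====
-- OPERATORS = ['*','+']
--
-- def gen_op_rec(n: int, l: list[list[str]]):
--     # One pass over the rows: row i gets, for levels e = n-1 down to 0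
--     # (half = 2**e), the operator with index ceil(i / half) % 2.
--     for i, row in enumerate(l):
--         row.extend(OPERATORS[(-(-i // (1 << e))) % 2] for e in reversed(range(n)))
--     return l
-- ===== Notes on version B (the rewrite author's own statement) =====
-- stated objective: simpler
-- what changed: Replaced the per-level tail recursion with its stateful op-flipping scan by a single pass over the rows that computes each appended operator directly from a closed form (operator index = ceil(i/2^e) mod 2) and extends every row with its whole suffix at once.
import Mathlib
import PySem

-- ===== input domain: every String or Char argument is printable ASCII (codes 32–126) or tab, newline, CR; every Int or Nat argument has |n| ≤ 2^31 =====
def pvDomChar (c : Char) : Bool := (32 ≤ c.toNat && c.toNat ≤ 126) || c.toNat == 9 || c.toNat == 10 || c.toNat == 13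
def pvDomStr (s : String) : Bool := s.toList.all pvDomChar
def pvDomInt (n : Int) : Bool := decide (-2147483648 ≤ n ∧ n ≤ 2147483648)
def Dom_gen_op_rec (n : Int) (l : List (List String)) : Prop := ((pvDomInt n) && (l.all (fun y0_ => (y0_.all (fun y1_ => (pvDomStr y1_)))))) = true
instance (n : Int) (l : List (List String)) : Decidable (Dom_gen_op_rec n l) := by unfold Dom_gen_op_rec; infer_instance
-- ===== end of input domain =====

-- B replaces A's per-level tail recursion with its stateful op-flipping scan by a single
-- pass over the rows that appends each row's whole operator suffix from a closed form
-- (objective: simpler).  Both Pythons mutate the rows of l in place in the same way; the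
-- theorems below are about the return value.

def OPERATORS : List String := ["*", "+"]

-- ===== PORT A =====
def gen_op_rec (n : Int) (l : List (List String)) : List (List String) :=
  let length : Int := PySem.List.len l
  if _h0 : n = 0 then l
  else if _hneg : n < 0 then
    -- unreachable under Pre_: the Python raises here (ZeroDivisionError / RecursionError)
    l
  else
    let st := (PySem.List.pyRange 0 length 1).foldl
      (fun (st : List (List String) × Int) i =>
        -- l[i].append(OPERATORS[op]); i comes from range(length), so 0 ≤ i < length and
        -- i.toNat is exact
        let l' := st.1.modify i.toNat (fun row => row ++ [(PySem.List.pyGet? OPERATORS st.2).getD ""])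
        let op' := if PySem.Int.mod i (PySem.Int.floordiv (2 ^ n.toNat) 2) = 0
                   then (if st.2 = 0 then 1 else 0) else st.2
        (l', op'))
      (l, 0)
    gen_op_rec (n - 1) st.1
termination_by n.toNat
decreasing_by omega

-- ===== PORT B =====
def gen_op_rec_alt (n : Int) (l : List (List String)) : List (List String) :=
  (PySem.List.enumerate l).map (fun p =>
    p.2 ++ ((PySem.List.pyRange 0 n 1).reverse.map (fun e =>
      -- OPERATORS[(-(-i // (1 << e))) % 2]; e comes from range(n), so e.toNat is exact
      (PySem.List.pyGet? OPERATORS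
        (PySem.Int.mod (-(PySem.Int.floordiv (-p.1) ((1 : Int) <<< e.toNat))) 2)).getD "")))

-- ===== PRECONDITION & SPEC =====
-- Pre_ excludes exactly n < 0, where the Python A raises (ZeroDivisionError on nonempty l,
-- RecursionError on empty l) and returns no value.
def Pre_gen_op_rec (n : Int) (l : List (List String)) : Prop := 0 ≤ n
instance (n : Int) (l : List (List String)) : Decidable (Pre_gen_op_rec n l) := by unfold Pre_gen_op_rec; infer_instance

def pvWitness_gen_op_rec : Int × List (List String) := (2, [["1"], ["2"], ["3"], ["4"]])

def Spec_gen_op_rec (n : Int) (l : List (List String)) (out : List (List String)) : Prop := out = gen_op_rec_alt n l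
instance (n : Int) (l : List (List String)) (out : List (List String)) : Decidable (Spec_gen_op_rec n l out) := by unfold Spec_gen_op_rec; infer_instance

-- ===== CLAIM (what is proved, stated in full; the proofs are below) =====
def Claim_equal_gen_op_rec : Prop := ∀ (n : Int) (l : List (List String)), Dom_gen_op_rec n l → Pre_gen_op_rec n l → Spec_gen_op_rec n l (gen_op_rec n l)

-- ===== LEMMAS AND PROOFS =====

-- number of op flips A performs while processing row indices 0 .. i-1 with divisor h
def cntc (h i : Nat) : Nat := (List.range i).countP (fun m => m % h = 0)

-- the operator appended to row i at a level whose half-value is h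
def symC (h i : Nat) : String := if cntc h i % 2 = 0 then "*" else "+"

-- the whole suffix row i receives from N levels (levels run from half 2^(N-1) down to 2^0)
def sufx (N i : Nat) : List String := (List.range N).reverse.map (fun e => symC (2 ^ e) i)

theorem cntc_succ (h i : Nat) :
    cntc h (i + 1) = cntc h i + (if i % h = 0 then 1 else 0) := by
  simp only [cntc, List.range_succ, List.countP_append, List.countP_cons, List.countP_nil]
  split_ifs with a b b <;> simp_all

-- the flip count is the ceiling of i / h
theorem cntc_eq_ceil (h i : Nat) (hh : 0 < h) : cntc h i = (i + h - 1) / h := by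
  induction i with
  | zero => simp [cntc]; rw [Nat.div_eq_of_lt (by omega)]
  | succ i ih =>
    rw [cntc_succ, ih]
    rcases Nat.eq_zero_or_pos i with hi | hi
    · subst hi
      simp [Nat.div_eq_of_lt (show h - 1 < h by omega), Nat.div_self hh]
    · have h1 : i + 1 + h - 1 = i + h := by omega
      have h2 : i + h - 1 = (i - 1) + h := by omega
      rw [h1, h2, Nat.add_div_right _ hh, Nat.add_div_right _ hh]
      have hs := @Nat.succ_div (i - 1) h
      rw [show i - 1 + 1 = i by omega] at hs
      rw [hs]
      have hdvd : i % h = 0 ↔ h ∣ i := (@Nat.dvd_iff_mod_eq_zero h i).symm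
      split_ifs with a b b <;> omega

-- the Int ceiling expression B computes, as a Nat ceiling division
theorem ceil_floordiv (h i : Nat) (hh : 0 < h) :
    -(PySem.Int.floordiv (-(i : Int)) (h : Int)) = (((i + h - 1) / h : Nat) : Int) := by
  rw [PySem.Int.neg_floordiv_neg_eq_iff_of_pos (by exact_mod_cast hh)]
  have h1 : h * ((i + h - 1) / h) + (i + h - 1) % h = i + h - 1 := Nat.div_add_mod _ _
  have hr : (i + h - 1) % h < h := Nat.mod_lt _ hh
  have hc : ((i + h - 1 : Nat) : Int) = (i : Int) + h - 1 := by
    push_cast [Nat.cast_sub (by omega : 1 ≤ i + h)]; ring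
  have hInt : (h : Int) * (((i + h - 1) / h : Nat) : Int) + (((i + h - 1) % h : Nat) : Int)
      = (i : Int) + h - 1 := by
    rw [← hc]; exact_mod_cast h1
  have hrI : (((i + h - 1) % h : Nat) : Int) < h := by exact_mod_cast hr
  have hhI : (0:Int) < h := by exact_mod_cast hh
  constructor <;> nlinarith

theorem op_get_mod2 (q : Nat) :
    (PySem.List.pyGet? OPERATORS ((q % 2 : Nat) : Int)).getD "" = (if q % 2 = 0 then "*" else "+") := by
  rcases Nat.mod_two_eq_zero_or_one q with hq | hq <;> simp [hq, OPERATORS]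

-- state of A's inner for-loop after processing indices 0 .. m-1: rows below m got their
-- symbol, op is the flip count mod 2
theorem innerA_state (hN : Nat) (L : List (List String)) (m : Nat) :
    ((List.range m).foldl
      (fun (st : List (List String) × Int) k =>
        (st.1.modify k (fun row => row ++ [(PySem.List.pyGet? OPERATORS st.2).getD ""]),
         if PySem.Int.mod (k : Int) (hN : Int) = 0 then (if st.2 = 0 then 1 else 0) else st.2))
      (L, 0))
    = (L.mapIdx (fun i row => if i < m then row ++ [symC hN i] else row),
       ((cntc hN m % 2 : Nat) : Int)) := by
  induction m with
  | zero =>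
    simp only [List.range_zero, List.foldl_nil, cntc, List.countP_nil, Nat.zero_mod, Nat.cast_zero]
    refine Prod.ext ?_ rfl
    apply List.ext_getElem <;> simp
  | succ m ih =>
    rw [List.range_succ, List.foldl_append, ih]
    simp only [List.foldl_cons, List.foldl_nil]
    have hmod : PySem.Int.mod (m : Int) (hN : Int) = ((m % hN : Nat) : Int) :=
      PySem.Int.mod_natCast m hN
    rw [Prod.mk.injEq]
    refine ⟨?_, ?_⟩
    · apply List.ext_getElem
      · simp
      intro j hj hj2
      rw [List.getElem_modify]
      simp only [List.getElem_mapIdx]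
      by_cases hjm : m = j
      · subst hjm
        simp only [lt_irrefl, if_false, Nat.lt_succ_iff, le_refl, if_true, symC]
        have h3 := op_get_mod2 (cntc hN m)
        push_cast at h3 ⊢
        rw [h3]
      · by_cases hlt : j < m <;>
          simp [hjm, hlt, show j < m + 1 ↔ j < m ∨ j = m by omega] <;> tauto
    · rw [hmod, cntc_succ]
      have h2 := Nat.mod_two_eq_zero_or_one (cntc hN m)
      by_cases hz : m % hN = 0 <;> rcases h2 with h2 | h2 <;>
        · simp only [hz, h2, if_true, if_false, Nat.cast_zero, Nat.cast_one]
          norm_num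
          omega

-- A in closed form: every row i gets the suffix sufx N i
theorem genA_closed (N : Nat) (L : List (List String)) :
    gen_op_rec (N : Int) L = L.mapIdx (fun i row => row ++ sufx N i) := by
  induction N generalizing L with
  | zero =>
    rw [gen_op_rec]
    simp only [Nat.cast_zero]
    apply List.ext_getElem <;> simp [sufx]
  | succ N ih =>
    rw [gen_op_rec]
    have hne : ¬ (((N + 1 : Nat) : Int) = 0) := by push_cast; omega
    have hng : ¬ (((N + 1 : Nat) : Int) < 0) := by push_cast; omega
    rw [dif_neg hne, dif_neg hng]
    have hlen : PySem.List.len L = (L.length : Int) := by simp [pysem]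
    have hhalf : PySem.Int.floordiv (2 ^ ((N + 1 : Nat) : Int).toNat) 2 = ((2 ^ N : Nat) : Int) := by
      have ht : ((N + 1 : Nat) : Int).toNat = N + 1 := by omega
      rw [ht, PySem.Int.floordiv_eq_ediv_of_pos (by omega)]
      push_cast
      rw [pow_succ]
      omega
    rw [hlen, PySem.List.pyRange_one, hhalf]
    simp only [sub_zero, Int.toNat_natCast, zero_add, List.foldl_map]
    rw [innerA_state (2 ^ N) L L.length]
    rw [show (((N + 1 : Nat) : Int) - 1) = (N : Int) by push_cast; ring]
    rw [ih]
    apply List.ext_getElem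
    · simp
    intro j hj hj2
    simp only [List.getElem_mapIdx] at *
    rw [if_pos (show j < L.length by simpa using hj)]
    simp [sufx, List.range_succ, List.append_assoc]

-- B in closed form: the same suffix, computed directly
theorem genB_closed (n : Int) (hn : 0 ≤ n) (L : List (List String)) :
    gen_op_rec_alt n L = L.mapIdx (fun i row => row ++ sufx n.toNat i) := by
  rw [gen_op_rec_alt]
  apply List.ext_getElem
  · simp [PySem.List.length_enumerate]
  intro j hj hj2
  simp only [List.getElem_map, PySem.List.getElem_enumerate, List.getElem_mapIdx]
  congr 1
  rw [PySem.List.pyRange_one]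
  simp only [sub_zero, zero_add]
  rw [← List.map_reverse, List.map_map]
  rw [sufx]
  refine List.map_congr_left ?_
  intro E hmem
  simp only [Function.comp_apply, Int.toNat_natCast]
  rw [Int.one_shiftLeft E, ceil_floordiv (2 ^ E) j (by positivity),
    show ((2:Int)) = ((2:Nat):Int) from rfl, PySem.Int.mod_natCast, op_get_mod2]
  rw [symC, cntc_eq_ceil _ _ (by positivity)]

-- ===== VERDICT (by name: the statement is the Claim_ definition above) =====
theorem gen_op_rec_spec : Claim_equal_gen_op_rec := by
  intro n l _hd hpre
  unfold Spec_gen_op_rec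
  unfold Pre_gen_op_rec at hpre
  have hA := genA_closed n.toNat l
  rw [show ((n.toNat : Nat) : Int) = n by omega] at hA
  rw [hA, genB_closed n hpre]
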